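-- pv_equiv track=rewrite | github.com/embodied-agent-interface/embodied-agent-interface | src/VIRTUALHOME/AgentEval-main/virtualhome/simulation/tl_interface/translation_vh_to_tl.py | translate_actions_into_exists
-- ===== SOURCE A (Python) =====
-- PARAM = 'xid'
--
-- def build_or_expression(predicates):
--     exp = '(' + ' or '.join(predicates) + ')' if len(predicates) > 1 else predicates[0] if len(predicates) > 0 else None
--     return exp
--
-- def translate_actions_into_exists(actions_with_placeholders):
--     last_level_expression = None
--     max_valid_param_num = 2 if len(actions_with_placeholders[2]) > 0 else 1 if len(actions_with_placeholders[1]) > 0 else 0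
--     for i in range(max_valid_param_num, -1, -1): # start from 2 to 0, including 2, 1, 0
--         current_level_expressions = []
--         current_level_expressions.extend(actions_with_placeholders[i])
--         if last_level_expression:
--             current_level_expressions.append(last_level_expression)
--         current_level_total_expression = build_or_expression(current_level_expressions)
--         param_str = PARAM.replace('id', str(i-1))
--         last_level_expression = f'exists {param_str}. ({current_level_total_expression})'
--
--     return current_level_total_expression
-- ===== SOURCE B (Python) =====
-- PARAM = 'xid'
--
-- def build_or_expression(predicates):
--     exp = '(' + ' or '.join(predicates) + ')' if len(predicates) > 1 else predicates[0] if len(predicates) > 0 else None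
--     return exp
--
-- def translate_actions_into_exists(actions_with_placeholders):
--     max_valid_param_num = 2 if len(actions_with_placeholders[2]) > 0 else 1 if len(actions_with_placeholders[1]) > 0 else 0
--
--     def build(i):
--         if i == max_valid_param_num:
--             return build_or_expression(list(actions_with_placeholders[i]))
--         inner = build(i + 1)
--         return build_or_expression(list(actions_with_placeholders[i]) + ['exists x' + str(i) + '. (' + inner + ')'])
--
--     return build(0)
-- ===== Notes on version B (the rewrite author's own statement) =====
-- stated objective: simpler
-- what changed: Replaces A's downward for-loop that threads last_level_expression state (building and then discarding an outermost 'exists x-1' wrapper and formatting an Option through str) with a direct top-down recursion build(i) from level 0 to the max valid level, returning build(0).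
import Mathlib
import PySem

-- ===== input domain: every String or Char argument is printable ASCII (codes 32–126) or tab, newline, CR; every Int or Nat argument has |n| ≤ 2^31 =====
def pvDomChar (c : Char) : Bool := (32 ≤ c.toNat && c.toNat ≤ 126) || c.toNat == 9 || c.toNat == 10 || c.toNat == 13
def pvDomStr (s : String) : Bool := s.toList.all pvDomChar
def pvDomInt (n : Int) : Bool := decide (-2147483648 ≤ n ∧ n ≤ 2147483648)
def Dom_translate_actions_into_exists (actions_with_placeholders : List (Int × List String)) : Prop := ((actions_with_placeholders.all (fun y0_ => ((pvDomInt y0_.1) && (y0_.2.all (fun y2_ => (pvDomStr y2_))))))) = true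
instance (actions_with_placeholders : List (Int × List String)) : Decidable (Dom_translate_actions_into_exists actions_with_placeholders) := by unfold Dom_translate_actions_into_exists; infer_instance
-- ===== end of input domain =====

-- B replaces A's downward loop (which threads a discarded outermost `exists x-1` wrapper and
-- formats an Option through str) by a direct top-down recursion build(i) over the levels; same result.

-- ===== PORT A =====
-- build_or_expression
def pvBuildOr (predicates : List String) : Option String :=
  if predicates.length > 1 then some ("(" ++ PySem.Str.join " or " predicates ++ ")")
  else predicates[0]?

def translate_actions_into_exists (actions_with_placeholders : List (Int × List String)) : Option String :=
  match (PySem.Dict.mk actions_with_placeholders).get? 2 with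
  | none => none  -- KeyError (excluded by Pre_)
  | some l2 =>
    let mxO : Option Int :=
      if l2.length > 0 then some 2
      else match (PySem.Dict.mk actions_with_placeholders).get? 1 with
        | none => none  -- KeyError (excluded by Pre_)
        | some l1 => some (if l1.length > 0 then 1 else 0)
    match mxO with
    | none => none
    | some mx =>
      -- for i in range(max_valid_param_num, -1, -1): state = (last_level_expression, current_level_total_expression)
      let res := (PySem.List.pyRange mx (-1) (-1)).foldl
        (fun (st : Option (Option String × Option String)) (i : Int) =>
          match st with
          | none => none
          | some (last, _) =>
            match (PySem.Dict.mk actions_with_placeholders).get? i with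
            | none => none  -- KeyError (excluded by Pre_)
            | some li =>
              let cur : List String := match last with
                | some s => if s = "" then li else li ++ [s]  -- `if last_level_expression:` truthiness
                | none => li
              let tot := pvBuildOr cur
              let param := PySem.Str.replace "xid" "id" (PySem.Int.toStr (i - 1))
              -- f-string formats None as "None"
              some (some ("exists " ++ param ++ ". (" ++ tot.getD "None" ++ ")"), tot))
        (some (none, none))
      match res with
      | some (_, tot) => tot
      | none => none

-- ===== PORT B =====
-- build(i), fuel = max_valid_param_num - i (the recursion stops at i = max)
def pvBuild (actions_with_placeholders : List (Int × List String)) : Nat → Int → Option String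
  | 0, i =>
    match (PySem.Dict.mk actions_with_placeholders).get? i with
    | none => none  -- KeyError (excluded by Pre_)
    | some li => pvBuildOr li
  | n + 1, i =>
    match (PySem.Dict.mk actions_with_placeholders).get? i, pvBuild actions_with_placeholders n (i + 1) with
    | some li, some inner =>
        pvBuildOr (li ++ ["exists x" ++ PySem.Int.toStr i ++ ". (" ++ inner ++ ")"])
    | _, _ => none

def translate_actions_into_exists_alt (actions_with_placeholders : List (Int × List String)) : Option String :=
  match (PySem.Dict.mk actions_with_placeholders).get? 2 with
  | none => none  -- KeyError (excluded by Pre_)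
  | some l2 =>
    if l2.length > 0 then pvBuild actions_with_placeholders 2 0
    else match (PySem.Dict.mk actions_with_placeholders).get? 1 with
      | none => none  -- KeyError (excluded by Pre_)
      | some l1 =>
        if l1.length > 0 then pvBuild actions_with_placeholders 1 0
        else pvBuild actions_with_placeholders 0 0

-- ===== PRECONDITION & SPEC =====
-- A raises KeyError unless the dict has entries for keys 0, 1 and 2; Pre_ excludes exactly those inputs.
def Pre_translate_actions_into_exists (actions_with_placeholders : List (Int × List String)) : Prop :=
  ((PySem.Dict.mk actions_with_placeholders).get? 0).isSome = true ∧
  ((PySem.Dict.mk actions_with_placeholders).get? 1).isSome = true ∧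
  ((PySem.Dict.mk actions_with_placeholders).get? 2).isSome = true
instance (actions_with_placeholders : List (Int × List String)) : Decidable (Pre_translate_actions_into_exists actions_with_placeholders) := by unfold Pre_translate_actions_into_exists; infer_instance

def pvWitness_translate_actions_into_exists : (List (Int × List String)) := [(0, ["a"]), (1, ["b"]), (2, ["c"])]

def Spec_translate_actions_into_exists (actions_with_placeholders : List (Int × List String)) (out : Option String) : Prop := out = translate_actions_into_exists_alt actions_with_placeholders
instance (actions_with_placeholders : List (Int × List String)) (out : Option String) : Decidable (Spec_translate_actions_into_exists actions_with_placeholders out) := by unfold Spec_translate_actions_into_exists; infer_instance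

-- ===== CLAIM (what is proved, stated in full; the proofs are below) =====
def Claim_equal_translate_actions_into_exists : Prop := ∀ (actions_with_placeholders : List (Int × List String)), Dom_translate_actions_into_exists actions_with_placeholders → Pre_translate_actions_into_exists actions_with_placeholders → Spec_translate_actions_into_exists actions_with_placeholders (translate_actions_into_exists actions_with_placeholders)

-- ===== LEMMAS AND PROOFS =====

lemma pvBuildOr_append_singleton (l : List String) (s : String) :
    pvBuildOr (l ++ [s]) =
      some (if (l ++ [s]).length > 1 then "(" ++ PySem.Str.join " or " (l ++ [s]) ++ ")" else s) := by
  cases l <;> simp [pvBuildOr]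

lemma pvBuildOr_pos (l : List String) (h : l.length > 0) :
    pvBuildOr l =
      some (if l.length > 1 then "(" ++ PySem.Str.join " or " l ++ ")" else l.headD "") := by
  cases l with
  | nil => simp at h
  | cons x t => cases t <;> simp [pvBuildOr]

-- ===== VERDICT (by name: the statement is the Claim_ definition above) =====
theorem translate_actions_into_exists_spec : Claim_equal_translate_actions_into_exists := by
  intro a _ hpre
  obtain ⟨h0, h1, h2⟩ := hpre
  rw [Option.isSome_iff_exists] at h0 h1 h2
  obtain ⟨l0, h0⟩ := h0
  obtain ⟨l1, h1⟩ := h1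
  obtain ⟨l2, h2⟩ := h2
  unfold Spec_translate_actions_into_exists translate_actions_into_exists translate_actions_into_exists_alt
  rw [h2]
  by_cases hl2 : l2.length > 0
  · simp only [if_pos hl2]
    have hr : PySem.List.pyRange 2 (-1) (-1) = [2, 1, 0] := by decide
    rw [hr]
    simp only [List.foldl, h0, h1, h2]
    have e1 : "exists " ++ PySem.Str.replace "xid" "id" (PySem.Int.toStr 1) = "exists x" ++ PySem.Int.toStr 1 := rfl
    have e0 : "exists " ++ PySem.Str.replace "xid" "id" (PySem.Int.toStr 0) = "exists x" ++ PySem.Int.toStr 0 := rfl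
    simp [pvBuild, h0, h1, h2, pvBuildOr_pos l2 hl2, pvBuildOr_append_singleton]
    simp only [e1, e0]
  · simp only [if_neg hl2]
    rw [h1]
    by_cases hl1 : l1.length > 0
    · simp only [if_pos hl1]
      have hr : PySem.List.pyRange 1 (-1) (-1) = [1, 0] := by decide
      rw [hr]
      simp only [List.foldl, h0, h1]
      have e0 : "exists " ++ PySem.Str.replace "xid" "id" (PySem.Int.toStr 0) = "exists x" ++ PySem.Int.toStr 0 := rfl
      simp [pvBuild, h0, h1, pvBuildOr_pos l1 hl1, pvBuildOr_append_singleton]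
      simp only [e0]
    · simp only [if_neg hl1]
      have hr : PySem.List.pyRange 0 (-1) (-1) = [0] := by decide
      rw [hr]
      simp only [List.foldl, h0]
      simp [pvBuild, h0]
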